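-- pv_equiv track=rewrite | github.com/mustafahakkoz/seasonality_analysis | pecnet.py | _build_sampling_groups
-- ===== SOURCE A (Python) =====
-- def _build_sampling_groups(values, window_length=7):
--     sampling_windows = []
--
--     # Add full windows in reverse order
--     for i in range(len(values), 0, -window_length):
--         window = values[i-window_length:i]
--         sampling_windows.append(window)
--
--     # Add the last window with remaining elements
--     remainder_size = len(values) % window_length
--     if remainder_size > 0:
--         last_window = values[:remainder_size]
--         sampling_windows[-1] = last_window
--
--     # reverse the order of windows
--     sampling_windows = sampling_windows[::-1]
--     return sampling_windows
-- ===== SOURCE B (Python) =====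
-- def _build_sampling_groups(values, window_length=7):
--     result = []
--     n = len(values)
--     r = n % window_length
--     if r > 0:
--         result.append(values[:r])
--     for i in range(r, n, window_length):
--         result.append(values[i:i+window_length])
--     return result
-- ===== Notes on version B (the rewrite author's own statement) =====
-- stated objective: simpler
-- what changed: Replaces the reverse-order loop with negative-wrapping slices, the last-element overwrite of the garbage partial window, and the final reversal by a single forward pass that emits the remainder chunk first and then full windows in order.
import Mathlib
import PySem

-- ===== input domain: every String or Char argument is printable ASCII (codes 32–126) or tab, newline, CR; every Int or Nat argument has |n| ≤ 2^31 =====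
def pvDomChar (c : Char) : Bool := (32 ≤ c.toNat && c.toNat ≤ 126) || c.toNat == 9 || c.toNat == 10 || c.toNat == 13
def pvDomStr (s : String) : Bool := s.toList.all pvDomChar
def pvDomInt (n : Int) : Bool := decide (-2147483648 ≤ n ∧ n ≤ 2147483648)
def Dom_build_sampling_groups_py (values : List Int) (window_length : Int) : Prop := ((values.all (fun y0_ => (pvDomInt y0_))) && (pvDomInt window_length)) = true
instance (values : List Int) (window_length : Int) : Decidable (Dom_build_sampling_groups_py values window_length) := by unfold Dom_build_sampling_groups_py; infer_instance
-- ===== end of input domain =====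

-- B replaces A's reverse-order loop + last-element overwrite + final [::-1] reversal by one forward pass
-- (remainder chunk first, then full windows in order); same return value, objective: simpler.

-- ===== PORT A =====
def build_sampling_groups_py (values : List Int) (window_length : Int) : List (List Int) :=
  -- for i in range(len(values), 0, -window_length): sampling_windows.append(values[i-window_length:i])
  let ws := (PySem.List.pyRange (values.length : Int) 0 (-window_length)).foldl
      (fun acc i => acc ++ [PySem.List.slice values (some (i - window_length)) (some i)]) []
  let remainder_size := PySem.Int.mod (values.length : Int) window_length
  -- sampling_windows[len-1] = last_window (Python writes it with the negative last index;
  -- whenever this branch runs the list is nonempty, so that is exactly position length - 1)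
  let ws := if remainder_size > 0 then
      ws.set (ws.length - 1) (PySem.List.slice values none (some remainder_size))
    else ws
  -- sampling_windows[::-1] is List.reverse (PySem.List.slice?_none_none_neg_one)
  ws.reverse

-- ===== PORT B =====
def build_sampling_groups_py_alt (values : List Int) (window_length : Int) : List (List Int) :=
  let n := (values.length : Int)
  let r := PySem.Int.mod n window_length
  let init := if r > 0 then [PySem.List.slice values none (some r)] else []
  (PySem.List.pyRange r n window_length).foldl
    (fun acc i => acc ++ [PySem.List.slice values (some i) (some (i + window_length))]) init

-- ===== PRECONDITION & SPEC =====
-- Pre_ excludes only window_length = 0, on which A raises ValueError (range step 0).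
def Pre_build_sampling_groups_py (values : List Int) (window_length : Int) : Prop :=
  window_length ≠ 0
instance (values : List Int) (window_length : Int) : Decidable (Pre_build_sampling_groups_py values window_length) := by unfold Pre_build_sampling_groups_py; infer_instance
def pvWitness_build_sampling_groups_py : List Int × Int := ([1, 2, 3], 2)

def Spec_build_sampling_groups_py (values : List Int) (window_length : Int) (out : List (List Int)) : Prop := out = build_sampling_groups_py_alt values window_length
instance (values : List Int) (window_length : Int) (out : List (List Int)) : Decidable (Spec_build_sampling_groups_py values window_length out) := by unfold Spec_build_sampling_groups_py; infer_instance

-- ===== CLAIM (what is proved, stated in full; the proofs are below) =====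
def Claim_equal_build_sampling_groups_py : Prop := ∀ (values : List Int) (window_length : Int), Dom_build_sampling_groups_py values window_length → Pre_build_sampling_groups_py values window_length → Spec_build_sampling_groups_py values window_length (build_sampling_groups_py values window_length)

-- ===== LEMMAS AND PROOFS =====

lemma pv_setLast {α : Type} (l1 : List α) (x y : α) :
    (l1 ++ [x]).set l1.length y = l1 ++ [y] := by
  induction l1 with
  | nil => rfl
  | cons a t ih => simp [ih]

-- range(r, q*k+r, k) for 0 < k
lemma pv_pyRange_up (k q r : Nat) (hk : 0 < k) :
    PySem.List.pyRange (r : Int) ((q * k + r : Nat) : Int) (k : Int) =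
      (List.range q).map (fun (t : Nat) => ((r + k * t : Nat) : Int)) := by
  rw [PySem.List.pyRange_of_pos _ _ (by exact_mod_cast hk)]
  have hcount : (if (r : Int) < ((q * k + r : Nat) : Int)
      then ((((q * k + r : Nat) : Int) - r + k - 1) / k).toNat else 0) = q := by
    rcases Nat.eq_zero_or_pos q with hq | hq
    · subst hq; simp
    · rw [if_pos (by push_cast; nlinarith)]
      have h2 : (((q * k + r : Nat) : Int) - r + k - 1) / k = q := by
        have h3 : (((q * k + r : Nat) : Int) - r + k - 1) = k * q + (k - 1) := by push_cast; ring
        rw [h3, Int.mul_add_ediv_left _ _ (by omega), Int.ediv_eq_zero_of_lt (by omega) (by omega)]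
        omega
      rw [h2]; omega
  rw [hcount]
  exact List.map_congr_left (fun t _ => by push_cast; ring)

-- range(n, 0, -k) for 0 < k
lemma pv_pyRange_down (k n : Nat) (hk : 0 < k) :
    PySem.List.pyRange (n : Int) 0 (-(k : Int)) =
      (List.range ((n + k - 1) / k)).map (fun (t : Nat) => ((n : Int) - (k : Int) * (t : Int))) := by
  have hstep : ¬ ((0:Int) < -(k : Int)) := by omega
  have hne : ¬ ((-(k : Int)) = 0) := by omega
  simp only [PySem.List.pyRange, if_neg hne, if_neg hstep, neg_neg]
  have hc : (if (0:Int) < (n : Int) then (((n : Int) - 0 + (k:Int) - 1) / (k:Int)).toNat else 0)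
      = (n + k - 1) / k := by
    rcases Nat.eq_zero_or_pos n with hn | hn
    · subst hn; simp [Nat.div_eq_of_lt (show k - 1 < k by omega)]
    · rw [if_pos (by exact_mod_cast hn)]
      have h1 : ((n : Int) - 0 + (k:Int) - 1) = ((n + k - 1 : Nat) : Int) := by
        rw [Nat.cast_sub (show 1 ≤ n + k by omega)]; push_cast; ring
      rw [h1, ← Int.natCast_ediv, Int.toNat_natCast]
  rw [hc]
  exact List.map_congr_left (fun t _ => by ring)

-- iteration count of A's loop
lemma pv_ceil_div (k q r : Nat) (hk : 0 < k) (hr : r < k) :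
    (q * k + r + k - 1) / k = q + (if 0 < r then 1 else 0) := by
  rw [show q * k + r + k - 1 = (r + k - 1) + q * k by omega, Nat.add_mul_div_right _ _ hk]
  rcases Nat.eq_zero_or_pos r with h0 | h0
  · rw [if_neg (by omega), h0, Nat.div_eq_of_lt (by omega)]; omega
  · rw [if_pos h0, show r + k - 1 = (r - 1) + 1 * k by omega,
      Nat.add_mul_div_right _ _ hk, Nat.div_eq_of_lt (by omega)]; omega

-- A's block of full windows, reversed, is B's block of full windows
lemma pv_rev_windows (values : List Int) (k q r : Nat)
    (hn : values.length = q * k + r) :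
    ((List.range q).map (fun (t : Nat) => PySem.List.slice values
        (some ((values.length : Int) - (k : Int) * (t : Int) - (k : Int)))
        (some ((values.length : Int) - (k : Int) * (t : Int))))).reverse
      = (List.range q).map (fun (t : Nat) => (values.drop (r + k * t)).take k) := by
  apply List.ext_getElem
  · simp
  · intro i h1 h2
    simp only [List.length_reverse, List.length_map, List.length_range] at h1 h2
    rw [List.getElem_reverse, List.getElem_map, List.getElem_map]
    simp only [List.length_map, List.length_range, List.getElem_range]
    obtain ⟨j, hj⟩ : ∃ j, q = i + j + 1 := ⟨q - 1 - i, by omega⟩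
    have h5 : i + j + 1 - 1 - i = j := by omega
    have ha : (values.length : Int) - (k : Int) * ((q - 1 - i : Nat) : Int) - (k : Int)
        = ((r + k * i : Nat) : Int) := by
      rw [hn, hj, h5]; push_cast; ring
    have hb : (values.length : Int) - (k : Int) * ((q - 1 - i : Nat) : Int)
        = ((r + k * i : Nat) : Int) + ((k : Nat) : Int) := by
      rw [hn, hj, h5]; push_cast; ring
    rw [ha, hb, PySem.List.slice_natCast_add]

lemma pv_A_eq (values : List Int) (k : Nat) (hk : 0 < k) :
    build_sampling_groups_py values (k : Int) =
      (if 0 < values.length % k then [values.take (values.length % k)] else []) ++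
        (List.range (values.length / k)).map
          (fun (t : Nat) => (values.drop (values.length % k + k * t)).take k) := by
  have hn : values.length = (values.length / k) * k + values.length % k :=
    (Nat.div_add_mod' _ _).symm
  have hr : values.length % k < k := Nat.mod_lt _ hk
  simp only [build_sampling_groups_py]
  rw [pv_pyRange_down k values.length hk, PySem.List.foldl_append_singleton_eq_map,
    List.nil_append, List.map_map, PySem.Int.mod_natCast,
    show values.length + k - 1 = (values.length / k) * k + values.length % k + k - 1 by omega,
    pv_ceil_div k _ _ hk hr]
  rcases Nat.eq_zero_or_pos (values.length % k) with h0 | h0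
  · rw [if_neg (by exact_mod_cast (by omega : ¬ ((values.length % k : Nat) : Int) > 0)), h0]
    simpa [Function.comp] using pv_rev_windows values k (values.length / k) 0 (by omega)
  · rw [if_pos (by exact_mod_cast h0 : ((values.length % k : Nat) : Int) > 0)]
    simp only [h0, if_true]
    rw [List.range_succ, List.map_append, List.map_singleton]
    have hlen : ((List.range (values.length / k)).map
        ((fun i => PySem.List.slice values (some (i - (k : Int))) (some i)) ∘
          fun (t : Nat) => (values.length : Int) - (k : Int) * (t : Int)) ++
        [((fun i => PySem.List.slice values (some (i - (k : Int))) (some i)) ∘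
          fun (t : Nat) => (values.length : Int) - (k : Int) * (t : Int)) (values.length / k)]).length - 1
        = ((List.range (values.length / k)).map
        ((fun i => PySem.List.slice values (some (i - (k : Int))) (some i)) ∘
          fun (t : Nat) => (values.length : Int) - (k : Int) * (t : Int))).length := by
      simp
    rw [hlen, pv_setLast, List.reverse_append, List.reverse_singleton, List.singleton_append,
      PySem.List.slice_to_natCast]
    simp only [List.singleton_append]
    congr 1
    simpa [Function.comp] using
      pv_rev_windows values k (values.length / k) (values.length % k) hn

lemma pv_B_eq (values : List Int) (k : Nat) (hk : 0 < k) :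
    build_sampling_groups_py_alt values (k : Int) =
      (if 0 < values.length % k then [values.take (values.length % k)] else []) ++
        (List.range (values.length / k)).map
          (fun (t : Nat) => (values.drop (values.length % k + k * t)).take k) := by
  unfold build_sampling_groups_py_alt
  simp only [PySem.Int.mod_natCast]
  rw [show (values.length : Int) = ((values.length / k * k + values.length % k : Nat) : Int) from
      by exact_mod_cast congrArg (Nat.cast (R := Int)) (Nat.div_add_mod' values.length k).symm,
    pv_pyRange_up k (values.length / k) (values.length % k) hk,
    PySem.List.foldl_append_singleton_eq_map, List.map_map]
  congr 1
  · split_ifs with h1 h2 h2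
    · rw [PySem.List.slice_to_natCast]
    · exact absurd (by exact_mod_cast h1 : 0 < values.length % k) h2
    · exact absurd (by exact_mod_cast h2 : ((values.length % k : Nat) : Int) > 0) h1
    · rfl
  · exact List.map_congr_left (fun t _ => by
      simp only [Function.comp_apply]
      rw [show ((values.length % k + k * t : Nat) : Int) + (k : Int)
            = ((values.length % k + k * t : Nat) : Int) + ((k : Nat) : Int) from rfl,
        PySem.List.slice_natCast_add])

-- ===== VERDICT (by name: the statement is the Claim_ definition above) =====
theorem build_sampling_groups_py_spec : Claim_equal_build_sampling_groups_py := by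
  intro values wl _ hpre
  unfold Spec_build_sampling_groups_py
  rcases lt_or_gt_of_ne hpre with hneg | hpos
  · -- window_length < 0 : both sides are []
    have hA : build_sampling_groups_py values wl = [] := by
      unfold build_sampling_groups_py
      have h1 : PySem.List.pyRange (values.length : Int) 0 (-wl) = [] := by
        rw [PySem.List.pyRange_of_pos _ _ (by omega)]
        rw [if_neg (by omega : ¬ ((values.length : Int) < 0))]
        simp
      have h2 : ¬ (PySem.Int.mod (values.length : Int) wl > 0) := by
        have := PySem.Int.mod_neg_bounds (values.length : Int) hneg; omega
      simp [h1, h2]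
    have hB : build_sampling_groups_py_alt values wl = [] := by
      unfold build_sampling_groups_py_alt
      have hb := PySem.Int.mod_neg_bounds (values.length : Int) hneg
      have h2 : ¬ (PySem.Int.mod (values.length : Int) wl > 0) := by omega
      have h1 : PySem.List.pyRange (PySem.Int.mod (values.length : Int) wl)
          (values.length : Int) wl = [] := by
        simp only [PySem.List.pyRange, if_neg hpre, if_neg (by omega : ¬ (0:Int) < wl),
          if_neg (by omega : ¬ (values.length : Int) < PySem.Int.mod (values.length : Int) wl)]
        simp
      simp [h1, h2]
    rw [hA, hB]
  · obtain ⟨k, rfl⟩ : ∃ k : Nat, wl = (k : Int) := ⟨wl.toNat, (Int.toNat_of_nonneg (by omega)).symm⟩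
    have hk : 0 < k := by exact_mod_cast hpos
    rw [pv_A_eq values k hk, pv_B_eq values k hk]
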